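-- pv_equiv track=rewrite | github.com/joseyarashio/CGUSA | PyPraat/doAnalysis.py | find_matching_list
-- ===== SOURCE A (Python) =====
-- def find_matching_list(Sampletext_list,Usertext_list):
--     matching=[]
--     pivot=-1
--     for idy, word_u in enumerate(Usertext_list):
--         for idx, word_s in enumerate(Sampletext_list):
--             if(word_u==word_s)and(word_u!=None)and(idx>pivot):
--                 matching.append((idx,idy))
--                 pivot=idx
--                 break
--     return matching
-- ===== SOURCE B (Python) =====
-- def _bisect_right(a, x):
--     lo, hi = 0, len(a)
--     while lo < hi:
--         mid = (lo + hi) // 2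
--         if x < a[mid]:
--             hi = mid
--         else:
--             lo = mid + 1
--     return lo
--
-- def find_matching_list(Sampletext_list, Usertext_list):
--     # index each word to its ascending occurrence positions, then binary-search
--     # (bisect) each user word's list for the first position past the pivot
--     positions = {}
--     for i, w in enumerate(Sampletext_list):
--         positions.setdefault(w, []).append(i)
--     matching = []
--     pivot = -1
--     for j, u in enumerate(Usertext_list):
--         ps = positions.get(u, [])
--         k = _bisect_right(ps, pivot)
--         if k < len(ps):
--             pivot = ps[k]
--             matching.append((pivot, j))
--     return matching
-- ===== Notes on version B (the rewrite author's own statement) =====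
-- stated objective: faster
-- what changed: B indexes the sample once as word -> ascending position list and binary-searches (hand-written bisect_right) that list for the first position beyond the pivot, replacing A's full linear rescan of the sample per user word.
import Mathlib
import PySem

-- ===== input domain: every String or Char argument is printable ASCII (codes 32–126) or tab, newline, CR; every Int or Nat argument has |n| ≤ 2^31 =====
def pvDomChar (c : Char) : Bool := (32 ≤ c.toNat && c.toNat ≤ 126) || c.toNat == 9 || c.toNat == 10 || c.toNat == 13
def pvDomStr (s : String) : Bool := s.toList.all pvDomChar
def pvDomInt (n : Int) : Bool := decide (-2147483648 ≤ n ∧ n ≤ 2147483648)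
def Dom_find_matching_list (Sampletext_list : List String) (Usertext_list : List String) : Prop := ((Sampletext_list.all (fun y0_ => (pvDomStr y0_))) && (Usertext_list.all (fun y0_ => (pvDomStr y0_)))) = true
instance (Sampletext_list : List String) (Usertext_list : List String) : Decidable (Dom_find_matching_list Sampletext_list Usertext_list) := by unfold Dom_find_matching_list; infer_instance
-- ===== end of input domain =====

-- B indexes the sample once as word -> ascending positions and binary-searches that
-- list for the first position past the pivot, instead of A's linear rescan per user word.


-- ===== PORT A =====
-- inner 'for idx, word_s in enumerate(Sampletext_list)' loop with break: first idx
-- whose word equals word_u and exceeds pivot (word_u != None is vacuous for strings)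
def pvInnerA (l : List (Int × String)) (word_u : String) (pivot : Int) : Option Int :=
  match l with
  | [] => none
  | p :: rest =>
    if word_u = p.2 ∧ p.1 > pivot then some p.1 else pvInnerA rest word_u pivot

def find_matching_list (Sampletext_list : List String) (Usertext_list : List String) : List (Int × Int) :=
  ((PySem.List.enumerate Usertext_list 0).foldl
    (fun (st : List (Int × Int) × Int) q =>
      match pvInnerA (PySem.List.enumerate Sampletext_list 0) q.2 st.2 with
      | some idx => (st.1 ++ [(idx, q.1)], idx)
      | none => st)
    ([], -1)).1

-- ===== PORT B =====
-- _bisect_right: 'lo, hi = 0, len(a); while lo < hi: …'; a[mid] is always in range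
-- (lo ≤ mid < hi ≤ len a), so the in-range access is written a.getD mid 0
def pvBisectRight (a : List Int) (x : Int) (lo hi : Nat) : Nat :=
  if h : lo < hi then
    let mid := (lo + hi) / 2
    if x < a.getD mid 0 then pvBisectRight a x lo mid
    else pvBisectRight a x (mid + 1) hi
  else lo
termination_by hi - lo
decreasing_by all_goals omega

-- the 'for j, u in enumerate(Usertext_list)' loop, as structural recursion carrying
-- the running index j and the pivot; appending to 'matching' becomes cons-recursion
def pvGoB (index : PySem.Dict String (List Int)) (us : List String) (j pivot : Int) :
    List (Int × Int) :=
  match us with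
  | [] => []
  | u :: rest =>
    let ps := index.getD u []
    let k := pvBisectRight ps pivot 0 ps.length
    if hk : k < ps.length then (ps[k], j) :: pvGoB index rest (j + 1) ps[k]
    else pvGoB index rest (j + 1) pivot

def find_matching_list_alt (Sampletext_list : List String) (Usertext_list : List String) : List (Int × Int) :=
  -- positions.setdefault(w, []).append(i)  ==  positions[w] = positions.get(w, []) + [i]
  let positions : PySem.Dict String (List Int) :=
    (PySem.List.enumerate Sampletext_list 0).foldl
      (fun d p => d.modify p.2 [] (fun l => l ++ [p.1])) PySem.Dict.empty
  pvGoB positions Usertext_list 0 (-1)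

-- ===== PRECONDITION & SPEC =====
def Spec_find_matching_list (Sampletext_list : List String) (Usertext_list : List String) (out : List (Int × Int)) : Prop := out = find_matching_list_alt Sampletext_list Usertext_list
instance (Sampletext_list : List String) (Usertext_list : List String) (out : List (Int × Int)) : Decidable (Spec_find_matching_list Sampletext_list Usertext_list out) := by unfold Spec_find_matching_list; infer_instance

-- ===== CLAIM (what is proved, stated in full; the proofs are below) =====
def Claim_equal_find_matching_list : Prop := ∀ (Sampletext_list : List String) (Usertext_list : List String), Dom_find_matching_list Sampletext_list Usertext_list → Spec_find_matching_list Sampletext_list Usertext_list (find_matching_list Sampletext_list Usertext_list)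

-- ===== LEMMAS AND PROOFS =====

-- proof-side intermediary: linear scan for the first element > pivot
def pvFirstGt (l : List Int) (pivot : Int) : Option Int :=
  match l with
  | [] => none
  | i :: rest => if i > pivot then some i else pvFirstGt rest pivot

-- the grouping loop produces, for each word u, the list of its enumerate-positions
theorem pv_getD_build (l : List (Int × String)) (d : PySem.Dict String (List Int)) (u : String) :
    ((l.foldl (fun d p => d.modify p.2 [] (fun l => l ++ [p.1])) d).getD u []) =
      d.getD u [] ++ (l.filter (fun p => p.2 == u)).map (·.1) := by
  induction l generalizing d with
  | nil => simp
  | cons p rest ih =>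
    simp only [List.foldl_cons, ih, List.filter_cons]
    by_cases h : p.2 = u
    · subst h; simp
    · have hb : (p.2 == u) = false := by simp [h]
      have h' : ¬ u = p.2 := fun e => h e.symm
      simp [hb, PySem.Dict.getD_modify, h']

-- A's inner scan over the whole enumerated sample equals the first-greater scan
-- over just the positions of the queried word
theorem pv_inner_eq (l : List (Int × String)) (u : String) (pivot : Int) :
    pvInnerA l u pivot = pvFirstGt ((l.filter (fun p => p.2 == u)).map (·.1)) pivot := by
  induction l with
  | nil => rfl
  | cons p rest ih =>
    simp only [pvInnerA, List.filter_cons]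
    by_cases h : p.2 = u
    · have hb : (p.2 == u) = true := by simp [h]
      simp only [hb, if_true, List.map_cons, pvFirstGt]
      by_cases hg : p.1 > pivot
      · simp [h, hg]
      · simp [hg, ih]
    · have hb : (p.2 == u) = false := by simp [h]
      have : ¬ (u = p.2 ∧ p.1 > pivot) := fun hc => h hc.1.symm
      simp [hb, this, ih]

-- bisect invariant: on a sorted list, with everything left of lo ≤ x and everything
-- from hi on > x, the result k keeps both properties and lo ≤ k ≤ hi
theorem pv_bisect_inv (a : List Int) (x : Int) (lo hi : Nat)
    (hs : a.Pairwise (· ≤ ·)) (hhi : hi ≤ a.length)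
    (hlo : ∀ i (h : i < a.length), i < lo → a[i] ≤ x)
    (hup : ∀ i (h : i < a.length), hi ≤ i → x < a[i]) :
    (∀ i (h : i < a.length), i < pvBisectRight a x lo hi → a[i] ≤ x) ∧
    (∀ i (h : i < a.length), pvBisectRight a x lo hi ≤ i → x < a[i]) := by
  by_cases h : lo < hi
  · have hmid : (lo + hi) / 2 < a.length := by omega
    rw [pvBisectRight, dif_pos h]
    have hget : a.getD ((lo + hi) / 2) 0 = a[(lo + hi) / 2] := List.getD_eq_getElem a 0 hmid
    by_cases hc : x < a.getD ((lo + hi) / 2) 0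
    · rw [if_pos hc]
      exact pv_bisect_inv a x lo ((lo + hi) / 2) hs (by omega) hlo
        (fun i hi2 hge => by
          rcases Nat.eq_or_lt_of_le hge with he | hlt
          · rw [hget] at hc; exact he ▸ hc
          · have := List.pairwise_iff_getElem.mp hs _ _ hmid hi2 hlt
            rw [hget] at hc; omega)
    · rw [if_neg hc]
      have hle : a[(lo + hi) / 2] ≤ x := by rw [← hget]; omega
      exact pv_bisect_inv a x ((lo + hi) / 2 + 1) hi hs hhi
        (fun i hi2 hlt => by
          rcases Nat.lt_or_ge i ((lo + hi) / 2) with h2 | h2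
          · have := List.pairwise_iff_getElem.mp hs _ _ hi2 hmid h2
            omega
          · have : i = (lo + hi) / 2 := by omega
            exact this ▸ hle)
        hup
  · rw [pvBisectRight, dif_neg h]
    exact ⟨fun i hi2 hlt => hlo i hi2 hlt, fun i hi2 hge => hup i hi2 (by omega)⟩
termination_by hi - lo
decreasing_by all_goals omega

-- the bisect result never exceeds hi
theorem pv_bisect_le (a : List Int) (x : Int) (lo hi : Nat) (h0 : lo ≤ hi) :
    pvBisectRight a x lo hi ≤ hi := by
  by_cases h : lo < hi
  · rw [pvBisectRight, dif_pos h]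
    by_cases hc : x < a.getD ((lo + hi) / 2) 0
    · rw [if_pos hc]
      exact le_trans (pv_bisect_le a x lo ((lo + hi) / 2) (by omega)) (by omega)
    · rw [if_neg hc]
      exact pv_bisect_le a x ((lo + hi) / 2 + 1) hi (by omega)
  · rw [pvBisectRight, dif_neg h]; omega
termination_by hi - lo
decreasing_by all_goals omega

-- the linear first-greater scan returns exactly the element at the split point
theorem pv_firstGt_of_split (a : List Int) (x : Int) (k : Nat) (hk : k ≤ a.length)
    (h1 : ∀ i (h : i < a.length), i < k → a[i] ≤ x)
    (h2 : ∀ i (h : i < a.length), k ≤ i → x < a[i]) :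
    pvFirstGt a x = a[k]? := by
  induction a generalizing k with
  | nil => simp [pvFirstGt]
  | cons b rest ih =>
    cases k with
    | zero =>
      have := h2 0 (by simp) (Nat.zero_le 0)
      simp only [List.getElem_cons_zero] at this
      simp [pvFirstGt, this]
    | succ m =>
      have hb : b ≤ x := by
        have := h1 0 (by simp) (Nat.succ_pos m); simpa using this
      have : ¬ b > x := by omega
      simp only [pvFirstGt, if_neg this, List.getElem?_cons_succ]
      exact ih m (by simpa using hk)
        (fun i hi2 hlt => by
          have := h1 (i + 1) (by simpa using hi2) (by omega)
          simpa using this)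
        (fun i hi2 hge => by
          have := h2 (i + 1) (by simpa using hi2) (by omega)
          simpa using this)

-- the occurrence lists are sorted ascending
theorem pv_positions_sorted (S : List String) (u : String) :
    ((((PySem.List.enumerate S 0).filter (fun p => p.2 == u)).map (·.1)).Pairwise (· ≤ ·)) := by
  have h1 : (PySem.List.enumerate S 0).Pairwise (fun p q => p.1 < q.1) :=
    PySem.List.pairwise_lt_enumerate S 0
  have h2 : (List.filter (fun p => p.2 == u) (PySem.List.enumerate S 0)).Pairwise
      (fun p q => p.1 < q.1) := h1.filter _
  exact (List.pairwise_map.mpr h2).imp (fun h => le_of_lt h)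

-- A's inner scan equals B's bisect-based lookup into the built index
theorem pv_inner_eq_bisect (S : List String) (u : String) (pivot : Int) :
    pvInnerA (PySem.List.enumerate S 0) u pivot =
      (let ps := (((PySem.List.enumerate S 0).foldl
          (fun d p => d.modify p.2 [] (fun l => l ++ [p.1])) PySem.Dict.empty).getD u [])
       ps[pvBisectRight ps pivot 0 ps.length]?) := by
  rw [pv_inner_eq]
  have hps : (((PySem.List.enumerate S 0).foldl
      (fun d p => d.modify p.2 [] (fun l => l ++ [p.1])) PySem.Dict.empty).getD u []) =
      ((PySem.List.enumerate S 0).filter (fun p => p.2 == u)).map (·.1) := by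
    rw [pv_getD_build]; simp
  simp only [hps]
  set ps := ((PySem.List.enumerate S 0).filter (fun p => p.2 == u)).map (·.1) with hps'
  have hsorted := pv_positions_sorted S u
  have hinv := pv_bisect_inv ps pivot 0 ps.length hsorted (le_refl _)
    (fun i _ h => absurd h (Nat.not_lt_zero i)) (fun i h2 hge => absurd hge (by omega))
  have hk : pvBisectRight ps pivot 0 ps.length ≤ ps.length :=
    pv_bisect_le ps pivot 0 ps.length (Nat.zero_le _)
  exact pv_firstGt_of_split ps pivot _ hk hinv.1 hinv.2

-- fold/recursion bridge for the outer loop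
theorem pv_outer_bridge (S : List String) (us : List String) (j pivot : Int)
    (acc : List (Int × Int)) :
    (((PySem.List.enumerate us j).foldl
      (fun (st : List (Int × Int) × Int) q =>
        match pvInnerA (PySem.List.enumerate S 0) q.2 st.2 with
        | some idx => (st.1 ++ [(idx, q.1)], idx)
        | none => st)
      (acc, pivot)).1) =
      acc ++ pvGoB ((PySem.List.enumerate S 0).foldl
          (fun d p => d.modify p.2 [] (fun l => l ++ [p.1])) PySem.Dict.empty)
        us j pivot := by
  induction us generalizing j pivot acc with
  | nil => simp [pvGoB, PySem.List.enumerate]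
  | cons u rest ih =>
    rw [PySem.List.enumerate_cons, List.foldl_cons]
    set ps := (((PySem.List.enumerate S 0).foldl
        (fun d p => d.modify p.2 [] (fun l => l ++ [p.1])) PySem.Dict.empty).getD u []) with hps
    have hinner := pv_inner_eq_bisect S u pivot
    simp only [← hps] at hinner
    by_cases hk : pvBisectRight ps pivot 0 ps.length < ps.length
    · have : ps[pvBisectRight ps pivot 0 ps.length]? =
        some ps[pvBisectRight ps pivot 0 ps.length] := List.getElem?_eq_getElem hk
      rw [show pvGoB _ (u :: rest) j pivot = _ from rfl]
      simp only [pvGoB, ← hps, dif_pos hk]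
      simp only [hinner, this, ih]
      simp
    · have : ps[pvBisectRight ps pivot 0 ps.length]? = none := List.getElem?_eq_none (by omega)
      simp only [pvGoB, ← hps, dif_neg hk]
      simp only [hinner, this, ih]

-- ===== VERDICT (by name: the statement is the Claim_ definition above) =====
theorem find_matching_list_spec : Claim_equal_find_matching_list := by
  intro S U _
  unfold Spec_find_matching_list find_matching_list find_matching_list_alt
  exact pv_outer_bridge S U 0 (-1) []
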